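-- pv_equiv track=rewrite | github.com/Kikcer/lume | demo/image_disc_embed_demo.py | get_embedding_idx
-- ===== SOURCE A (Python) =====
-- def get_embedding_idx(generated_ids_trimmed, EMBEDDING_TOKEN_ID):
--
--     embedding_idx = []
--     # Search from the last token forward
--     for i, out_ids in enumerate(generated_ids_trimmed):
--         embed_exist = False
--         for j in range(len(out_ids) - 1, -1, -1):
--             if out_ids[j] == EMBEDDING_TOKEN_ID:
--                 embedding_idx.append(j)
--                 embed_exist = True
--                 break
--         if not embed_exist:
--             embedding_idx.append(-1)
--
--     return embedding_idx
-- ===== SOURCE B (Python) =====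
-- def get_embedding_idx(generated_ids_trimmed, EMBEDDING_TOKEN_ID):
--     embedding_idx = []
--     for out_ids in generated_ids_trimmed:
--         last = -1
--         for j, tok in enumerate(out_ids):
--             if tok == EMBEDDING_TOKEN_ID:
--                 last = j
--         embedding_idx.append(last)
--     return embedding_idx
-- ===== Notes on version B (the rewrite author's own statement) =====
-- stated objective: alternative
-- what changed: A scans each sequence backwards with an explicit index range and breaks on the first match from the end; B scans forwards once with enumerate, keeping a running accumulator of the most recent matching index (no break, no reverse range).
import Mathlib
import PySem

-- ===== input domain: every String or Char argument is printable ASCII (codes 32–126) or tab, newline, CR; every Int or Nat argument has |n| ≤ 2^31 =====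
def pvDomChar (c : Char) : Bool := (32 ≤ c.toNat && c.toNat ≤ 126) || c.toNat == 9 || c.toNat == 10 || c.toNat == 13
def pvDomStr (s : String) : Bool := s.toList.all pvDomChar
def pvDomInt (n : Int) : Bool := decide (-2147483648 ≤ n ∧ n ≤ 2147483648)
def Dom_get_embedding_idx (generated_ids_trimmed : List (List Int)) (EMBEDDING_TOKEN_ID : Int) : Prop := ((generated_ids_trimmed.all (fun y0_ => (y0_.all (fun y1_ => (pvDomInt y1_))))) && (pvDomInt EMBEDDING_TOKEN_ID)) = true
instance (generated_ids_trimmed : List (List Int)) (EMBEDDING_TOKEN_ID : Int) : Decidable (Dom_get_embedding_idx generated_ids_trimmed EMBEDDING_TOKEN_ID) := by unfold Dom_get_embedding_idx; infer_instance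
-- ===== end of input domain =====

-- B replaces A's backward index-range scan with break by a single forward
-- enumerate pass keeping the most recent matching index (objective: alternative).

-- ===== PORT A =====
-- inner loop `for j in range(len(out_ids)-1,-1,-1): if out_ids[j]==t: append j; break`
-- the `break` becomes returning j; falling off the range returns -1 (the `not embed_exist` branch)
def pvAFind (idxs : List Int) (out_ids : List Int) (t : Int) : Int :=
  match idxs with
  | [] => -1
  | j :: rest =>
      if PySem.List.pyGetD out_ids j 0 = t then j else pvAFind rest out_ids t

def get_embedding_idx (generated_ids_trimmed : List (List Int)) (EMBEDDING_TOKEN_ID : Int) : List Int :=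
  generated_ids_trimmed.map (fun out_ids =>
    pvAFind (PySem.List.pyRange ((out_ids.length : Int) - 1) (-1) (-1)) out_ids EMBEDDING_TOKEN_ID)

-- ===== PORT B =====
-- forward pass: `last = -1; for j, tok in enumerate(out_ids): if tok == t: last = j`
def pvBLast (out_ids : List Int) (t : Int) : Int :=
  (PySem.List.enumerate out_ids).foldl (fun last p => if p.2 = t then p.1 else last) (-1)

def get_embedding_idx_alt (generated_ids_trimmed : List (List Int)) (EMBEDDING_TOKEN_ID : Int) : List Int :=
  generated_ids_trimmed.map (fun out_ids => pvBLast out_ids EMBEDDING_TOKEN_ID)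

-- ===== PRECONDITION & SPEC =====
def Spec_get_embedding_idx (generated_ids_trimmed : List (List Int)) (EMBEDDING_TOKEN_ID : Int) (out : List Int) : Prop := out = get_embedding_idx_alt generated_ids_trimmed EMBEDDING_TOKEN_ID
instance (generated_ids_trimmed : List (List Int)) (EMBEDDING_TOKEN_ID : Int) (out : List Int) : Decidable (Spec_get_embedding_idx generated_ids_trimmed EMBEDDING_TOKEN_ID out) := by unfold Spec_get_embedding_idx; infer_instance

-- ===== CLAIM (what is proved, stated in full; the proofs are below) =====
def Claim_equal_get_embedding_idx : Prop := ∀ (generated_ids_trimmed : List (List Int)) (EMBEDDING_TOKEN_ID : Int), Dom_get_embedding_idx generated_ids_trimmed EMBEDDING_TOKEN_ID → Spec_get_embedding_idx generated_ids_trimmed EMBEDDING_TOKEN_ID (get_embedding_idx generated_ids_trimmed EMBEDDING_TOKEN_ID)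

-- ===== LEMMAS AND PROOFS =====

-- the backward scan only looks at the listed indices
theorem pvAFind_congr (idxs : List Int) (xs ys : List Int) (t : Int)
    (h : ∀ j ∈ idxs, PySem.List.pyGetD ys j 0 = PySem.List.pyGetD xs j 0) :
    pvAFind idxs ys t = pvAFind idxs xs t := by
  induction idxs with
  | nil => rfl
  | cons j rest ih =>
      simp only [pvAFind, h j (by simp)]
      exact if_congr Iff.rfl rfl (ih (fun k hk => h k (by simp [hk])))

-- per-sequence agreement, by induction from the right
theorem pvFind_eq_last (xs : List Int) (t : Int) :
    pvAFind (PySem.List.pyRange ((xs.length : Int) - 1) (-1) (-1)) xs t = pvBLast xs t := by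
  induction xs using List.reverseRecOn with
  | nil =>
      simp [pvAFind, pvBLast, PySem.List.enumerate]
  | append_singleton xs a ih =>
      have hcons := PySem.List.pyRange_neg_one_cons
        (a := ((xs ++ [a]).length : Int) - 1) (b := -1)
        (by simp; omega)
      have hlen : ((xs ++ [a]).length : Int) - 1 = (xs.length : Int) := by simp
      rw [hlen] at hcons
      -- left side
      rw [hlen, hcons]
      simp only [pvAFind]
      have hget : PySem.List.pyGetD (xs ++ [a]) (xs.length : Int) 0 = a := by
        rw [PySem.List.pyGetD_natCast]
        simp [List.getD_eq_getElem?_getD]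
      -- right side
      have henum : PySem.List.enumerate (xs ++ [a]) 0
          = PySem.List.enumerate xs 0 ++ [((xs.length : Int), a)] := by
        rw [PySem.List.enumerate_append]
        simp [PySem.List.enumerate]
      have hb : pvBLast (xs ++ [a]) t
          = if a = t then (xs.length : Int) else pvBLast xs t := by
        unfold pvBLast
        rw [henum, List.foldl_append]
        by_cases h : a = t <;> simp [h]
      rw [hb, hget]
      by_cases h : a = t
      · simp [h]
      · simp only [if_neg h]
        rw [← ih]
        apply pvAFind_congr
        intro j hj
        rw [PySem.List.mem_pyRange_neg_one] at hj
        obtain ⟨k, rfl⟩ : ∃ k : Nat, j = (k : Int) := ⟨j.toNat, by omega⟩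
        have hk : k < xs.length := by omega
        rw [PySem.List.pyGetD_natCast, PySem.List.pyGetD_natCast]
        simp [List.getD_eq_getElem?_getD, List.getElem?_append_left hk]

-- ===== VERDICT (by name: the statement is the Claim_ definition above) =====
theorem get_embedding_idx_spec : Claim_equal_get_embedding_idx := by
  intro g t _
  unfold Spec_get_embedding_idx get_embedding_idx get_embedding_idx_alt
  exact List.map_congr_left (fun xs _ => pvFind_eq_last xs t)
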